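-- pv_equiv track=rewrite | github.com/yeonwoo1125/cospro-python-study | yeonwoo/answer/카드뽑기_게임!(도박은_안되요!).py | solution
-- ===== SOURCE A (Python) =====
-- def solution(cards):
-- 	answer = 0
-- 	count = {}
--
-- 	for i in range(len(cards)):
-- 		card = cards[i][0]
-- 		if card in count:
-- 			count.update({card : count.get(card) + 1})
-- 		else:
-- 			count.update({card : 0})
--
-- 	for i in range(len(cards)):
-- 				answer += int(cards[i][1])
--
-- 	d = 0
-- 	for cnt in count.values():
-- 		d = max(cnt, d)
--
-- 	if d == 1:
-- 		answer *= 2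
-- 	elif d == 2:
-- 		answer *= 3
--
-- 	return answer
-- ===== SOURCE B (Python) =====
-- def solution(cards):
--     total = 0
--     firsts = []
--     for c in cards:
--         total += int(c[1])
--         firsts.append(c[0])
--     firsts.sort()
--     best = run = 0
--     prev = None
--     for ch in firsts:
--         run = run + 1 if ch == prev else 1
--         prev = ch
--         if run > best:
--             best = run
--     return total * (2 if best == 2 else 3 if best == 3 else 1)
-- ===== Notes on version B (the rewrite author's own statement) =====
-- stated objective: alternative
-- what changed: B replaces A's frequency dictionary and values-max pass by sorting the first characters and scanning once for the longest run of equal consecutive values (which equals the maximum duplicate count), folding the conditional doubling/tripling into one multiplier.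
import Mathlib
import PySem

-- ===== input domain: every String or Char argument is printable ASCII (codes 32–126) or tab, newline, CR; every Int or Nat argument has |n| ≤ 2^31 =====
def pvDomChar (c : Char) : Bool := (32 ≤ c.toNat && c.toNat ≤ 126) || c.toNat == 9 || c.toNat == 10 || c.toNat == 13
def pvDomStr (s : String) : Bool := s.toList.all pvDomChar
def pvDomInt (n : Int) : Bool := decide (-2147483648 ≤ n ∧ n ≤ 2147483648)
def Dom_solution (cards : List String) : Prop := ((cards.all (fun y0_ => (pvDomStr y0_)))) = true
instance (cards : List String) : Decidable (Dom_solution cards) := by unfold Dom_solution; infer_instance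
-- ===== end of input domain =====

-- B replaces A's frequency dictionary by sort-and-scan: the longest run of equal consecutive
-- sorted first characters is the maximum duplicate count (objective: alternative).

-- ===== PORT A =====
-- card value int(cards[i][1]) as an Int (Pre_ guarantees the char exists and is a digit)
def pvVal (s : String) : Int :=
  (PySem.Int.ofStr? (String.ofList [(PySem.Str.pyGet? s 1).getD ' '])).getD 0

-- first character cards[i][0] (Pre_ guarantees it exists)
def pvFst (s : String) : Char := (PySem.Str.pyGet? s 0).getD ' '

def solution (cards : List String) : Int :=
  let count : PySem.Dict Char Int :=
    (PySem.List.pyRange 0 (cards.length : Int) 1).foldl (fun d i =>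
      let card := pvFst (PySem.List.pyGetD cards i "")
      if d.contains card then d.insert card ((d.get? card).getD 0 + 1)
      else d.insert card 0) PySem.Dict.empty
  let answer : Int :=
    (PySem.List.pyRange 0 (cards.length : Int) 1).foldl (fun a i =>
      a + pvVal (PySem.List.pyGetD cards i "")) 0
  let d : Int := count.values.foldl (fun acc cnt => max cnt acc) 0
  if d = 1 then answer * 2 else if d = 2 then answer * 3 else answer

-- ===== PORT B =====
-- the body of B's scanning loop (best, run, prev)
def pvStepB (st : Int × Int × Option Char) (ch : Char) : Int × Int × Option Char :=
  let run := if some ch = st.2.2 then st.2.1 + 1 else 1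
  (if run > st.1 then run else st.1, run, some ch)

def solution_alt (cards : List String) : Int :=
  let st := cards.foldl (fun (st : Int × List Char) c =>
    (st.1 + pvVal c, st.2 ++ [pvFst c])) (0, [])
  let firsts := PySem.List.sorted st.2 (fun x => x) false
  let fin := firsts.foldl pvStepB (0, 0, none)
  st.1 * (if fin.1 = 2 then 2 else if fin.1 = 3 then 3 else 1)

-- ===== PRECONDITION & SPEC =====
-- Pre_: exactly the inputs A returns on — every card has a first character and a digit second
-- character (otherwise Python raises IndexError resp. ValueError in int()).
def Pre_solution (cards : List String) : Prop :=
  ∀ s ∈ cards, 2 ≤ s.toList.length ∧ PySem.Chars.isdigit (s.toList.getD 1 ' ') = true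
instance (cards : List String) : Decidable (Pre_solution cards) := by unfold Pre_solution; infer_instance
def pvWitness_solution : List String := (["a1", "a2", "b3"])

def Spec_solution (cards : List String) (out : Int) : Prop := out = solution_alt cards
instance (cards : List String) (out : Int) : Decidable (Spec_solution cards out) := by unfold Spec_solution; infer_instance

-- ===== CLAIM (what is proved, stated in full; the proofs are below) =====
def Claim_equal_solution : Prop := ∀ (cards : List String), Dom_solution cards → Pre_solution cards → Spec_solution cards (solution cards)

-- ===== LEMMAS AND PROOFS =====

-- maximum duplicate count of a list (0 when empty), as a recursive spec
def mc : List Char → Int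
  | [] => 0
  | x :: t => max (1 + (t.count x : Int)) (mc (t.filter (fun y => !(y == x))))
termination_by l => l.length
decreasing_by
  simp only [List.length_cons, Nat.lt_succ_iff, List.length_unattach]
  exact le_trans (List.length_filter_le _ _) (by simp)

theorem mc_nil : mc [] = 0 := by rw [mc]

theorem mc_cons (x : Char) (t : List Char) :
    mc (x :: t) = max (1 + (t.count x : Int)) (mc (t.filter (fun y => !(y == x)))) := by
  rw [mc]

theorem mc_le (l : List Char) : ∀ c ∈ l, (l.count c : Int) ≤ mc l := by
  induction hn : l.length using Nat.strong_induction_on generalizing l with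
  | _ n ih' =>
  match l, hn with
  | [], _ => intro c hc; simp at hc
  | x :: t, hn =>
    have ih : ∀ (m : List Char), m.length < n → ∀ c ∈ m, (m.count c : Int) ≤ mc m :=
      fun m hm c hc => ih' m.length hm m rfl c hc
    intro c hc
    rw [mc_cons]
    rcases List.mem_cons.mp hc with h | h
    · subst h
      exact le_trans (by simp) (le_max_left _ _)
    · by_cases hcx : c = x
      · subst hcx
        exact le_trans (by simp) (le_max_left _ _)
      · have hmem : c ∈ t.filter (fun y => !(y == x)) := by
          simp [List.mem_filter, h, hcx]
        have hcount : (t.filter (fun y => !(y == x))).count c = t.count c := by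
          rw [List.count_filter]; simp [hcx]
        have hlt : (t.filter (fun y => !(y == x))).length < n := by
          rw [← hn]
          exact Nat.lt_succ_of_le (le_trans (List.length_filter_le _ _) (le_refl _))
        have := ih _ hlt c hmem
        rw [hcount] at this
        calc ((x :: t).count c : Int) = (t.count c : Int) := by
              rw [List.count_cons_of_ne (Ne.symm hcx)]
          _ ≤ mc (t.filter (fun y => !(y == x))) := this
          _ ≤ _ := le_max_right _ _

theorem mc_attain (l : List Char) : l ≠ [] → ∃ c ∈ l, mc l = (l.count c : Int) := by
  induction hn : l.length using Nat.strong_induction_on generalizing l with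
  | _ n ih' =>
  match l, hn with
  | [], _ => intro h; exact absurd rfl h
  | x :: t, hn =>
    have ih : ∀ (m : List Char), m.length < n → m ≠ [] → ∃ c ∈ m, mc m = (m.count c : Int) :=
      fun m hm hne => ih' m.length hm m rfl hne
    intro _
    rw [mc_cons]
    by_cases hle : mc (t.filter (fun y => !(y == x))) ≤ 1 + (t.count x : Int)
    · exact ⟨x, List.mem_cons_self, by
        rw [max_eq_left hle]; simp; omega⟩
    · rw [not_le] at hle
      have hne : t.filter (fun y => !(y == x)) ≠ [] := by
        intro hnil
        rw [hnil, mc_nil] at hle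
        have : (0:Int) ≤ (t.count x : Int) := Int.natCast_nonneg _
        omega
      have hlt : (t.filter (fun y => !(y == x))).length < n := by
        rw [← hn]
        exact Nat.lt_succ_of_le (List.length_filter_le _ _)
      rcases ih _ hlt hne with ⟨c, hc, hmc⟩
      have hcx : ¬ (c = x) := by
        have := (List.mem_filter.mp hc).2; simpa using this
      have hct : c ∈ t := (List.mem_filter.mp hc).1
      refine ⟨c, List.mem_cons_of_mem _ hct, ?_⟩
      rw [max_eq_right (le_of_lt hle), hmc, List.count_filter]
      rw [List.count_cons_of_ne (Ne.symm hcx)]; simp [hcx]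

theorem mc_pos (l : List Char) (h : l ≠ []) : 1 ≤ mc l := by
  rcases mc_attain l h with ⟨c, hc, hmc⟩
  rw [hmc]
  exact_mod_cast List.count_pos_iff.mpr hc

theorem mc_perm (l m : List Char) (h : l.Perm m) : mc l = mc m := by
  rcases eq_or_ne l [] with hl | hl
  · subst hl
    rw [List.perm_nil.mp h.symm]
  · have hm : m ≠ [] := by
      intro hm; exact hl (List.perm_nil.mp (hm ▸ h))
    rcases mc_attain l hl with ⟨c, hc, hmcl⟩
    rcases mc_attain m hm with ⟨d, hd, hmcm⟩
    have h1 : mc l ≤ mc m := by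
      rw [hmcl, h.count_eq c]
      exact mc_le m c (h.mem_iff.mp hc)
    have h2 : mc m ≤ mc l := by
      rw [hmcm, ← h.count_eq d]
      exact mc_le l d (h.mem_iff.mpr hd)
    omega

-- the scanning loop on a sorted tail: closed form of the final best
theorem pvScan (s : List Char) (hs : s.Pairwise (· ≤ ·)) :
    ∀ (c : Char) (best run : Int), (∀ x ∈ s, c ≤ x) → 0 ≤ run → run ≤ best →
    (s.foldl pvStepB (best, run, some c)).1
      = max best (max (run + (s.count c : Int)) (mc (s.filter (fun y => !(y == c))))) := by
  induction s with
  | nil =>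
    intro c best run _ h0 hrb
    simp only [List.foldl_nil, List.count_nil, List.filter_nil, mc_nil, Nat.cast_zero]
    omega
  | cons x t ih =>
    intro c best run hcle h0 hrb
    have ht : t.Pairwise (· ≤ ·) := hs.tail
    have hxt : ∀ y ∈ t, x ≤ y := fun y hy => List.rel_of_pairwise_cons hs hy
    by_cases hx : x = c
    · subst hx
      have hstep : pvStepB (best, run, some x) x
          = (if run + 1 > best then run + 1 else best, run + 1, some x) := by
        simp [pvStepB]
      rw [List.foldl_cons, hstep]
      have hbest' : run + 1 ≤ (if run + 1 > best then run + 1 else best) := by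
        split_ifs <;> omega
      rw [ih ht x _ _ hxt (by omega) hbest']
      have hcnt : ((x :: t).count x : Int) = 1 + (t.count x : Int) := by
        simp; omega
      have hfil : (x :: t).filter (fun y => !(y == x)) = t.filter (fun y => !(y == x)) := by
        simp
      rw [hcnt, hfil]
      have htc : (0:Int) ≤ (t.count x : Int) := Int.natCast_nonneg _
      split_ifs <;> omega
    · have hcx : c < x := lt_of_le_of_ne (hcle x List.mem_cons_self) (fun h => hx h.symm)
      have hcnot : c ∉ x :: t := by
        intro hc
        rcases List.mem_cons.mp hc with h | h
        · exact hx h.symm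
        · exact absurd (lt_of_lt_of_le hcx (hxt c h)) (lt_irrefl c)
      have hcnt : ((x :: t).count c : Nat) = 0 := List.count_eq_zero.mpr hcnot
      have hfil : (x :: t).filter (fun y => !(y == c)) = x :: t := by
        rw [List.filter_eq_self]
        intro y hy
        simp only [ne_eq, Bool.not_eq_eq_eq_not, Bool.not_true, beq_eq_false_iff_ne]
        intro h; exact hcnot (h ▸ hy)
      have hstep : pvStepB (best, run, some c) x
          = (if 1 > best then 1 else best, 1, some x) := by
        have : (some x = some c) = False := by simp [hx]
        simp [pvStepB, this]
      rw [List.foldl_cons, hstep]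
      have hbest' : (1:Int) ≤ (if 1 > best then 1 else best) := by split_ifs <;> omega
      rw [ih ht x _ _ hxt (by omega) hbest']
      rw [hcnt, hfil, mc_cons]
      have htx : (0:Int) ≤ (t.count x : Int) := Int.natCast_nonneg _
      split_ifs <;> omega

-- A's dict-update branch is a single insert with default -1
theorem pvStepA_eq (d : PySem.Dict Char Int) (x : Char) :
    (if d.contains x then d.insert x ((d.get? x).getD 0 + 1) else d.insert x 0)
      = d.insert x (d.getD x (-1) + 1) := by
  by_cases h : d.contains x = true
  · simp only [h, if_true]
    rw [PySem.Dict.contains_eq_isSome_get?] at h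
    rcases Option.isSome_iff_exists.mp h with ⟨v, hv⟩
    rw [PySem.Dict.getD_eq_get?_getD, hv]
    rfl
  · have h' : d.contains x = false := by simpa using h
    rw [PySem.Dict.getD_of_not_contains d (-1) h']
    simp [h']

-- the counting loop computes counts shifted by the initial default
theorem pvLoopA_getD (l : List Char) (d : PySem.Dict Char Int) (c : Char) :
    (l.foldl (fun d x => d.insert x (d.getD x (-1) + 1)) d).getD c (-1)
      = d.getD c (-1) + l.count c := by
  induction l generalizing d with
  | nil => simp
  | cons x t ih =>
    simp only [List.foldl_cons, ih, PySem.Dict.getD_insert, List.count_cons]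
    by_cases hc : c = x
    · subst hc; simp; omega
    · simp [hc, (by simpa using Ne.symm hc : ¬ x = c)]

-- fold-max facts for A's values-max loop
theorem pvFoldMaxInitLe (L : List Int) (i : Int) :
    i ≤ L.foldl (fun acc cnt => max cnt acc) i := by
  induction L generalizing i with
  | nil => simp
  | cons x s ih =>
    simp only [List.foldl_cons]
    exact le_trans (le_max_right x i) (ih (max x i))

theorem pvFoldMaxLeMem (L : List Int) (i : Int) :
    ∀ v ∈ L, v ≤ L.foldl (fun acc cnt => max cnt acc) i := by
  induction L generalizing i with
  | nil => intro v hv; simp at hv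
  | cons x s ih =>
    intro v hv
    simp only [List.foldl_cons]
    rcases List.mem_cons.mp hv with h | h
    · subst h
      exact le_trans (le_max_left v i) (pvFoldMaxInitLe s _)
    · exact ih (max x i) v h

theorem pvFoldMaxAttain (L : List Int) (i : Int) :
    L.foldl (fun acc cnt => max cnt acc) i = i ∨
      L.foldl (fun acc cnt => max cnt acc) i ∈ L := by
  induction L generalizing i with
  | nil => left; rfl
  | cons x s ih =>
    simp only [List.foldl_cons]
    rcases ih (max x i) with h | h
    · rw [h]
      by_cases hxi : i ≤ x
      · right; rw [max_eq_left hxi]; exact List.mem_cons_self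
      · left; rw [max_eq_right (le_of_not_ge hxi)]
    · right; exact List.mem_cons_of_mem _ h

-- B's accumulating loop splits into the value sum and the list of first characters
theorem pvPairFold (cards : List String) (a : Int) (l : List Char) :
    cards.foldl (fun (st : Int × List Char) c => (st.1 + pvVal c, st.2 ++ [pvFst c])) (a, l)
      = (cards.foldl (fun x c => x + pvVal c) a, l ++ cards.map pvFst) := by
  induction cards generalizing a l with
  | nil => simp
  | cons c t ih => simp [List.foldl_cons, ih]

-- ===== VERDICT (by name: the statement is the Claim_ definition above) =====
theorem solution_spec : Claim_equal_solution := by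
  intro cards _ _
  unfold Spec_solution
  simp only [solution, solution_alt]
  rw [PySem.List.foldl_pyRange_zero_pyGetD' cards ""
        (fun (d : PySem.Dict Char Int) s =>
          if d.contains (pvFst s) then d.insert (pvFst s) ((d.get? (pvFst s)).getD 0 + 1)
          else d.insert (pvFst s) 0) PySem.Dict.empty,
      PySem.List.foldl_pyRange_zero_pyGetD' cards "" (fun (a : Int) s => a + pvVal s) 0,
      pvPairFold]
  set F := cards.map pvFst with hF
  set total := cards.foldl (fun a c => a + pvVal c) 0 with htot
  -- A's dict: value at c is F.count c - 1
  have hdict : cards.foldl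
      (fun d s => if d.contains (pvFst s) then d.insert (pvFst s) ((d.get? (pvFst s)).getD 0 + 1)
                  else d.insert (pvFst s) 0) PySem.Dict.empty
      = F.foldl (fun d x => d.insert x (d.getD x (-1) + 1)) PySem.Dict.empty := by
    rw [hF, List.foldl_map]
    simp only [pvStepA_eq]
  rw [hdict]
  set D := F.foldl (fun d x => d.insert x (d.getD x (-1) + 1)) PySem.Dict.empty with hD
  have hnodup : D.keys.Nodup :=
    PySem.Dict.nodup_keys_foldl_insert F _ _ PySem.Dict.nodup_keys_empty
  have hkeys : D.keys = PySem.Set.ofList F := by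
    rw [hD, PySem.Dict.keys_foldl_insert]
    simp [PySem.Dict.keys_empty, PySem.Set.update_nil_left]
  have hvals : D.values = (PySem.Set.ofList F).map (fun k => -1 + (F.count k : Int)) := by
    rw [PySem.Dict.values_eq_map_keys D hnodup (-1), hkeys]
    refine List.map_congr_left ?_
    intro k _
    rw [hD, pvLoopA_getD, PySem.Dict.getD_empty]
  rw [hvals]
  -- B's sorted list of firsts
  set s := PySem.List.sorted ([] ++ F) (fun x => x) false with hs
  have hsF : s.Perm F := by
    rw [hs, List.nil_append]; exact PySem.List.sorted_perm F _ _
  have hpw : s.Pairwise (· ≤ ·) := by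
    have := PySem.List.sorted_pairwise ([] ++ F) (fun x => x)
    simpa [hs] using this
  rcases eq_or_ne F [] with hFnil | hFne
  · -- no cards: both maxima are 0, neither branch multiplies
    have hsnil : s = [] := List.perm_nil.mp (hFnil ▸ hsF)
    simp [hFnil, hsnil, PySem.Set.ofList]
  · -- A's d equals mc F - 1
    have hd : ((PySem.Set.ofList F).map (fun k => -1 + (F.count k : Int))).foldl
        (fun acc cnt => max cnt acc) 0 = mc F - 1 := by
      have hmc1 : 1 ≤ mc F := mc_pos F hFne
      rcases mc_attain F hFne with ⟨c, hc, hmc⟩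
      have hcS : c ∈ PySem.Set.ofList F := (PySem.Set.mem_ofList F c).mpr hc
      have hlow := pvFoldMaxLeMem ((PySem.Set.ofList F).map (fun k => -1 + (F.count k : Int)))
        0 (-1 + (F.count c : Int)) (List.mem_map.mpr ⟨c, hcS, rfl⟩)
      have hup : ((PySem.Set.ofList F).map (fun k => -1 + (F.count k : Int))).foldl
          (fun acc cnt => max cnt acc) 0 ≤ mc F - 1 := by
        rcases pvFoldMaxAttain ((PySem.Set.ofList F).map (fun k => -1 + (F.count k : Int))) 0
          with h | h
        · omega
        · rcases List.mem_map.mp h with ⟨k, hk, hkv⟩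
          have := mc_le F k ((PySem.Set.mem_ofList F k).mp hk)
          omega
      omega
    rw [hd]
    -- B's scan computes mc s = mc F
    have hsne : s ≠ [] := by
      intro h; exact hFne (List.perm_nil.mp (h ▸ hsF.symm))
    rcases hsc : s with _ | ⟨x, t⟩
    · exact absurd hsc hsne
    · have hpw' : (x :: t).Pairwise (· ≤ ·) := hsc ▸ hpw
      have hstep : pvStepB (0, 0, none) x = (1, 1, some x) := by
        simp [pvStepB]
      have hbest : ((x :: t).foldl pvStepB (0, 0, none)).1 = mc (x :: t) := by
        rw [List.foldl_cons, hstep,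
            pvScan t hpw'.tail x 1 1 (fun y hy => List.rel_of_pairwise_cons hpw' hy) (by omega) (by omega),
            mc_cons]
        have htx : (0:Int) ≤ (t.count x : Int) := Int.natCast_nonneg _
        have h1 : 1 ≤ mc (x :: t) := mc_pos _ (by simp)
        rw [mc_cons] at h1
        omega
      have hmcs : mc (x :: t) = mc F := hsc ▸ mc_perm s F hsF
      rw [hbest, hmcs]
      have hmc1 : 1 ≤ mc F := mc_pos F hFne
      by_cases h2 : mc F = 2
      · simp [h2]
      · by_cases h3 : mc F = 3
        · simp [h3]
        · rw [if_neg (by omega), if_neg (by omega), if_neg h2, if_neg h3, mul_one]
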